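-- pv_equiv track=rewrite | github.com/AToner/AdventofCode2018 | Day2.py | two_three_count
-- ===== SOURCE A (Python) =====
-- def two_three_count(input_line):
--     characters = list(input_line.strip())
--     characters.sort()
--
--     last_char = ''
--     current_counter = 0
--
--     two_count = 0
--     three_count = 0
--
--     for i, char in enumerate(characters):
--         if char == last_char:
--             current_counter += 1
--
--         if char != last_char or i == len(characters) - 1:
--             if current_counter == 2:
--                 two_count += 1
--             elif current_counter == 3:
--                 three_count += 1
--
--             current_counter = 1
--
--         last_char = char
--
--     return two_count, three_count
-- ===== SOURCE B (Python) =====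
-- def two_three_count(input_line):
--     counts = {}
--     for ch in input_line.strip():
--         counts[ch] = counts.get(ch, 0) + 1
--     two_count = sum(1 for v in counts.values() if v == 2)
--     three_count = sum(1 for v in counts.values() if v == 3)
--     return two_count, three_count
-- ===== Notes on version B (the rewrite author's own statement) =====
-- stated objective: faster
-- what changed: Replaces sort + last_char/current_counter run-length state machine (with its end-of-list special case) by a single-pass frequency dict whose values are then counted for 2 and 3.
import Mathlib
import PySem

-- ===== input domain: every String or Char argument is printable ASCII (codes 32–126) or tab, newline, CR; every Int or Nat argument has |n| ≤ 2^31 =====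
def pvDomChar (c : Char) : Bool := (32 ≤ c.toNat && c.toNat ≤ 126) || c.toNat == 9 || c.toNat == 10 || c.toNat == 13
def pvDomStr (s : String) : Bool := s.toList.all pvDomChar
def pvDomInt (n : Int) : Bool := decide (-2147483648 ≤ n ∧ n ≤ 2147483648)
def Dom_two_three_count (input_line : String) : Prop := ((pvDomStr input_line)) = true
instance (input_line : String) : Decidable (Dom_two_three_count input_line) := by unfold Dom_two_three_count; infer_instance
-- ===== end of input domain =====

-- B replaces A's sort + last_char/current_counter run-length state machine by a one-pass
-- frequency dict whose values are then counted for 2 and 3 (no sort; measured faster).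

-- ===== PORT A =====
-- the loop body of A, with n = len(characters); state = (last_char, current_counter, two_count, three_count)
def pvStepA (n : Int) (st : Option Char × Int × Int × Int) (p : Int × Char) : Option Char × Int × Int × Int :=
  let cnt : Int := if some p.2 = st.1 then st.2.1 + 1 else st.2.1
  if ¬ some p.2 = st.1 ∨ p.1 = n - 1 then
    (some p.2, 1,
      (if cnt = 2 then st.2.2.1 + 1 else st.2.2.1),
      (if cnt = 2 then st.2.2.2 else if cnt = 3 then st.2.2.2 + 1 else st.2.2.2))
  else (some p.2, cnt, st.2.2.1, st.2.2.2)

def two_three_count (input_line : String) : List Int :=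
  let characters : List Char :=
    PySem.List.sorted (PySem.Chars.strip input_line.toList) (fun x => x) false
  let st := (PySem.List.enumerate characters 0).foldl
    (pvStepA (characters.length : Int)) (none, 0, 0, 0)
  [st.2.2.1, st.2.2.2]

-- ===== PORT B =====
def two_three_count_alt (input_line : String) : List Int :=
  let counts : PySem.Dict Char Int :=
    (PySem.Chars.strip input_line.toList).foldl
      (fun d ch => d.insert ch (d.getD ch 0 + 1)) PySem.Dict.empty
  let two_count := counts.values.foldl (fun acc v => if v = 2 then acc + 1 else acc) (0 : Int)
  let three_count := counts.values.foldl (fun acc v => if v = 3 then acc + 1 else acc) (0 : Int)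
  [two_count, three_count]

-- ===== PRECONDITION & SPEC =====
def Spec_two_three_count (input_line : String) (out : List Int) : Prop := out = two_three_count_alt input_line
instance (input_line : String) (out : List Int) : Decidable (Spec_two_three_count input_line out) := by unfold Spec_two_three_count; infer_instance

-- ===== CLAIM (what is proved, stated in full; the proofs are below) =====
def Claim_equal_two_three_count : Prop := ∀ (input_line : String), Dom_two_three_count input_line → Spec_two_three_count input_line (two_three_count input_line)

-- ===== LEMMAS AND PROOFS =====

def pvF2 (cnt : Int) : Int := if cnt = 2 then 1 else 0
def pvF3 (cnt : Int) : Int := if cnt = 2 then 0 else if cnt = 3 then 1 else 0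

def pvStepMid (st : Option Char × Int × Int × Int) (c : Char) : Option Char × Int × Int × Int :=
  if some c = st.1 then (some c, st.2.1 + 1, st.2.2.1, st.2.2.2)
  else (some c, 1, st.2.2.1 + pvF2 st.2.1, st.2.2.2 + pvF3 st.2.1)

def pvStepLast (st : Option Char × Int × Int × Int) (c : Char) : Option Char × Int × Int × Int :=
  let cnt : Int := if some c = st.1 then st.2.1 + 1 else st.2.1
  (some c, 1, st.2.2.1 + pvF2 cnt, st.2.2.2 + pvF3 cnt)

def pvRunA (l : List Char) (st : Option Char × Int × Int × Int) : Option Char × Int × Int × Int :=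
  if l = [] then st else pvStepLast (l.dropLast.foldl pvStepMid st) (l.getLastD ' ')

def pvN (m : List Char) (j : Int) : Int := ((PySem.Set.ofList m).countP (fun c => decide ((m.count c : Int) = j)) : Int)

theorem pvStepA_mid (n : Int) (st : Option Char × Int × Int × Int) (p : Int × Char) (h : p.1 ≠ n - 1) :
    pvStepA n st p = pvStepMid st p.2 := by
  simp only [pvStepA, pvStepMid, pvF2, pvF3, h, or_false]
  by_cases he : some p.2 = st.1 <;> simp [he] <;> split_ifs <;> omega

theorem pvStepA_last (n : Int) (st : Option Char × Int × Int × Int) (p : Int × Char) (h : p.1 = n - 1) :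
    pvStepA n st p = pvStepLast st p.2 := by
  simp only [pvStepA, pvStepLast, pvF2, pvF3, h, or_true, if_true]
  by_cases he : some p.2 = st.1 <;> simp [he] <;> split_ifs <;> omega

theorem pvEnumFold (l : List Char) (j n : Int) (st : Option Char × Int × Int × Int)
    (hne : l ≠ []) (hj : j + l.length = n) :
    (PySem.List.enumerate l j).foldl (pvStepA n) st
      = pvStepLast (l.dropLast.foldl pvStepMid st) (l.getLastD ' ') := by
  induction l generalizing j st with
  | nil => exact absurd rfl hne
  | cons c t ih =>
    rw [PySem.List.enumerate_cons]
    cases t with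
    | nil =>
      simp only [List.length_cons, List.length_nil] at hj
      simp [PySem.List.enumerate_nil, pvStepA_last n st (j, c) (by omega)]
    | cons d t' =>
      simp only [List.length_cons] at hj
      push_cast at hj
      simp only [List.foldl_cons]
      rw [pvStepA_mid n st (j, c) (by omega)]
      rw [ih (j + 1) (pvStepMid st c) (by simp) (by simp only [List.length_cons]; push_cast; omega)]
      simp [List.dropLast, List.getLastD]

theorem pvFoldEnum_eq_runA (l : List Char) (st : Option Char × Int × Int × Int) :
    (PySem.List.enumerate l 0).foldl (pvStepA (l.length : Int)) st = pvRunA l st := by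
  by_cases h : l = []
  · subst h; simp [PySem.List.enumerate_nil, pvRunA]
  · rw [pvEnumFold l 0 _ st h (by push_cast; ring), pvRunA, if_neg h]

theorem pvReplFold (k : Nat) (c : Char) (cnt tw th : Int) :
    (List.replicate k c).foldl pvStepMid (some c, cnt, tw, th) = (some c, cnt + k, tw, th) := by
  induction k generalizing cnt with
  | zero => simp
  | succ k ih =>
    rw [List.replicate_succ, List.foldl_cons]
    simp only [pvStepMid, if_true]
    rw [ih (cnt + 1)]
    push_cast; ring_nf

theorem pvStepMid_rebase (c x : Char) (k tw th : Int) (hx : x ≠ c) :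
    pvStepMid (some c, k, tw, th) x = pvStepMid (none, 0, tw + pvF2 k, th + pvF3 k) x := by
  simp [pvStepMid, hx, pvF2, pvF3]

theorem pvStepLast_rebase (c x : Char) (k tw th : Int) (hx : x ≠ c) :
    pvStepLast (some c, k, tw, th) x = pvStepLast (none, 0, tw + pvF2 k, th + pvF3 k) x := by
  simp [pvStepLast, hx, pvF2, pvF3]

theorem pvFold_rebase (u : List Char) (c : Char) (k tw th : Int) (e : Char)
    (hu : ∀ x ∈ u, x ≠ c) (he : e ≠ c) :
    pvStepLast (u.foldl pvStepMid (some c, k, tw, th)) e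
      = pvStepLast (u.foldl pvStepMid (none, 0, tw + pvF2 k, th + pvF3 k)) e := by
  cases u with
  | nil => simpa using pvStepLast_rebase c e k tw th he
  | cons x r =>
    simp only [List.foldl_cons]
    rw [pvStepMid_rebase c x k tw th (hu x (by simp))]

-- Set.ofList lemmas
theorem pvOfList_replicate_fold (k : Nat) (c : Char) (s : PySem.Set Char) :
    (List.replicate k c).foldl PySem.Set.add (PySem.Set.add s c) = PySem.Set.add s c := by
  induction k with
  | zero => simp
  | succ k ih =>
    rw [List.replicate_succ, List.foldl_cons]
    have : PySem.Set.add (PySem.Set.add s c) c = PySem.Set.add s c := by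
      simp only [PySem.Set.add, PySem.Set.contains]
      split_ifs with h <;> simp_all
    rw [this, ih]

theorem pvFoldAdd_cons (t : List Char) (c : Char) (hu : ∀ x ∈ t, x ≠ c) (s : List Char) :
    t.foldl PySem.Set.add (c :: s) = c :: t.foldl PySem.Set.add s := by
  induction t generalizing s with
  | nil => simp
  | cons x r ih =>
    simp only [List.foldl_cons]
    have hxc : x ≠ c := hu x (by simp)
    have : PySem.Set.add (c :: s) x = c :: PySem.Set.add s x := by
      simp only [PySem.Set.add, PySem.Set.contains, List.contains_cons]
      simp [hxc]
      split_ifs <;> simp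
    rw [this, ih (fun y hy => hu y (by simp [hy]))]

theorem pvOfList_run (k : Nat) (hk : 1 ≤ k) (c : Char) (t : List Char) (hu : ∀ x ∈ t, x ≠ c) :
    PySem.Set.ofList (List.replicate k c ++ t) = c :: PySem.Set.ofList t := by
  obtain ⟨k', rfl⟩ : ∃ k', k = k' + 1 := ⟨k - 1, by omega⟩
  rw [PySem.Set.ofList_eq_foldl, PySem.Set.ofList_eq_foldl, List.foldl_append,
    List.replicate_succ, List.foldl_cons]
  have h1 : PySem.Set.add ([] : List Char) c = [c] := by simp [PySem.Set.add, PySem.Set.contains]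
  rw [h1, show ([c] : List Char) = PySem.Set.add [] c from h1.symm, pvOfList_replicate_fold, h1]
  exact pvFoldAdd_cons t c hu []

theorem pvN_nil (j : Int) : pvN [] j = 0 := by simp [pvN, PySem.Set.ofList]

theorem pvN_run (k : Nat) (hk : 1 ≤ k) (c : Char) (t : List Char) (hu : ∀ x ∈ t, x ≠ c) (j : Int) :
    pvN (List.replicate k c ++ t) j = (if (k : Int) = j then (1 : Int) else 0) + pvN t j := by
  unfold pvN
  rw [pvOfList_run k hk c t hu, List.countP_cons]
  have hm : (List.replicate k c ++ t).count c = k := by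
    rw [List.count_append, List.count_replicate_self, List.count_eq_zero.mpr (fun hc => hu c hc rfl)]
    omega
  have hx : ∀ x ∈ PySem.Set.ofList t, (List.replicate k c ++ t).count x = t.count x := by
    intro x hx
    have hxc : x ≠ c := hu x ((PySem.Set.mem_ofList t x).mp hx)
    rw [List.count_append, List.count_replicate]
    simp [Ne.symm hxc]
  have hcongr : List.countP (fun x => decide (((List.replicate k c ++ t).count x : Int) = j)) (PySem.Set.ofList t)
      = List.countP (fun x => decide ((t.count x : Int) = j)) (PySem.Set.ofList t) :=
    List.countP_congr (fun x hxm => by simp [hx x hxm])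
  rw [hcongr, hm]
  push_cast
  split_ifs with h1 h2 <;> simp_all <;> omega

theorem pvReplFromNone (k : Nat) (hk : 1 ≤ k) (c : Char) (tw th : Int) :
    (List.replicate k c).foldl pvStepMid (none, 0, tw, th) = (some c, (k : Int), tw, th) := by
  obtain ⟨k', rfl⟩ : ∃ k', k = k' + 1 := ⟨k - 1, by omega⟩
  rw [List.replicate_succ, List.foldl_cons]
  have h1 : pvStepMid (none, 0, tw, th) c = (some c, 1, tw, th) := by simp [pvStepMid, pvF2, pvF3]
  rw [h1, pvReplFold]
  push_cast; ring_nf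

theorem pvMainAux : ∀ (n : Nat) (m : List Char), m.length ≤ n → m.Pairwise (· ≤ ·) → ∀ tw th : Int,
    (pvRunA m (none, 0, tw, th)).2.2 = (tw + pvN m 2, th + pvN m 3) := by
  intro n
  induction n with
  | zero =>
    intro m hm _ tw th
    have : m = [] := List.eq_nil_of_length_eq_zero (by omega)
    subst this; simp [pvRunA, pvN_nil]
  | succ n ih =>
    intro m hm hp tw th
    cases hmm : m with
    | nil => simp [pvRunA, pvN_nil]
    | cons c m0 =>
      subst hmm
      set p : Char → Bool := fun x => x == c with hp_def
      set t := (c :: m0).dropWhile p with ht_def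
      set k := ((c :: m0).takeWhile p).length with hk_def
      have hA : (c :: m0).takeWhile p = List.replicate k c :=
        List.eq_replicate_of_mem (fun b hb => by simpa [hp_def] using List.mem_takeWhile_imp hb)
      have hk1 : 1 ≤ k := by
        rw [hk_def, List.takeWhile_cons_of_pos (by simp [hp_def])]; simp
      have hsplit : c :: m0 = List.replicate k c ++ t := by
        rw [← hA, ht_def, List.takeWhile_append_dropWhile]
      have hts : t.Pairwise (· ≤ ·) := hp.sublist (List.dropWhile_sublist _)
      have htnc : ∀ x ∈ t, x ≠ c := by
        intro x hxt
        have hne' : t ≠ [] := fun h => by rw [h] at hxt; simp at hxt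
        have hd : p (t.head hne') = false := List.head_dropWhile_not p hne'
        have hdc : t.head hne' ≠ c := by simpa [hp_def] using hd
        have hcd : c ≤ t.head hne' := by
          have hpa := (List.pairwise_append.mp (hsplit ▸ hp)).2.2
          exact hpa c (List.mem_replicate.mpr ⟨Nat.one_le_iff_ne_zero.mp hk1, rfl⟩) _ (List.head_mem hne')
        have hclt : c < t.head hne' := lt_of_le_of_ne hcd (fun h => hdc h.symm)
        have hcons := List.cons_head_tail hne'
        rw [← hcons] at hxt hts
        rcases List.mem_cons.mp hxt with h | h
        · exact h ▸ hdc
        · have hhx : t.head hne' ≤ x := (List.pairwise_cons.mp hts).1 x h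
          intro he
          subst he
          exact absurd (lt_of_lt_of_le hclt hhx) (lt_irrefl x)
      have hlen : t.length ≤ n := by
        have := congrArg List.length hsplit
        simp [List.length_append] at this
        simp at hm
        omega
      clear_value t k
      rw [hsplit]
      rw [show pvN (List.replicate k c ++ t) 2 = (if (k:Int) = 2 then (1:Int) else 0) + pvN t 2 from pvN_run k hk1 c t htnc 2]
      rw [show pvN (List.replicate k c ++ t) 3 = (if (k:Int) = 3 then (1:Int) else 0) + pvN t 3 from pvN_run k hk1 c t htnc 3]
      by_cases ht : t = []
      · rw [ht]
        simp only [List.append_nil, pvN_nil]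
        obtain ⟨k'', rfl⟩ : ∃ k'', k = k'' + 1 := ⟨k - 1, by omega⟩
        rw [pvRunA, if_neg (by simp)]
        rw [List.replicate_succ', List.dropLast_concat, List.getLastD_concat]
        cases k'' with
        | zero =>
          simp [pvStepLast, pvF2, pvF3]
        | succ j =>
          rw [pvReplFromNone (j + 1) (by omega) c tw th]
          simp only [pvStepLast, pvF2, pvF3]
          push_cast
          simp only [Prod.mk.injEq]
          constructor <;> split_ifs <;> omega
      · rw [pvRunA, if_neg (by simp [ht])]
        rw [List.dropLast_append_of_ne_nil ht, List.foldl_append]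
        rw [pvReplFromNone k hk1 c tw th]
        have hgl : (List.replicate k c ++ t).getLastD ' ' = t.getLastD ' ' := by
          rw [List.getLastD_eq_getLast?, List.getLastD_eq_getLast?,
            List.getLast?_append_of_ne_nil (List.replicate k c) ht]
        rw [hgl]
        have hemem : t.getLastD ' ' ∈ t := by
          rw [List.getLastD_eq_getLast?, List.getLast?_eq_some_getLast ht]
          exact List.getLast_mem ht
        have hu' : ∀ x ∈ t.dropLast, x ≠ c := fun x hx => htnc x ((List.dropLast_sublist t).mem hx)
        rw [pvFold_rebase t.dropLast c (k : Int) tw th _ hu' (htnc _ hemem)]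
        have hrun : pvStepLast (t.dropLast.foldl pvStepMid (none, 0, tw + pvF2 (k:Int), th + pvF3 (k:Int))) (t.getLastD ' ')
            = pvRunA t (none, 0, tw + pvF2 (k:Int), th + pvF3 (k:Int)) := by
          rw [pvRunA, if_neg ht]
        rw [hrun, ih t hlen hts _ _]
        simp only [pvF2, pvF3, Prod.mk.injEq]
        constructor <;> split_ifs <;> first | omega | ring

theorem pvN_sorted (l : List Char) (j : Int) :
    pvN (PySem.List.sorted l (fun x => x) false) j = pvN l j := by
  unfold pvN
  have hperm : (PySem.List.sorted l (fun x => x) false).Perm l := PySem.List.sorted_perm l _ _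
  have hset : (PySem.Set.ofList (PySem.List.sorted l (fun x => x) false)).Perm (PySem.Set.ofList l) := by
    rw [List.perm_ext_iff_of_nodup (PySem.Set.nodup_ofList _) (PySem.Set.nodup_ofList _)]
    intro a
    rw [PySem.Set.mem_ofList, PySem.Set.mem_ofList]
    exact hperm.mem_iff
  rw [List.countP_congr (p := fun c => decide (((PySem.List.sorted l (fun x => x) false).count c : Int) = j))
        (q := fun c => decide ((l.count c : Int) = j)) (fun x _ => by simp [hperm.count_eq])]
  rw [hset.countP_eq]

theorem pvB_eq (input_line : String) :
    two_three_count_alt input_line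
      = [pvN (PySem.Chars.strip input_line.toList) 2, pvN (PySem.Chars.strip input_line.toList) 3] := by
  unfold two_three_count_alt
  rw [PySem.Dict.foldl_insert_getD_add_one_eq_counter]
  simp only [PySem.Dict.values, PySem.Dict.items_counter, List.map_map]
  rw [PySem.List.foldl_ite_add_one, PySem.List.foldl_ite_add_one]
  simp only [List.countP_map, pvN, zero_add]
  rfl

theorem pvA_eq (input_line : String) :
    two_three_count input_line
      = [pvN (PySem.Chars.strip input_line.toList) 2, pvN (PySem.Chars.strip input_line.toList) 3] := by
  rw [show two_three_count input_line
      = [((PySem.List.enumerate (PySem.List.sorted (PySem.Chars.strip input_line.toList) (fun x => x) false) 0).foldl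
          (pvStepA ((PySem.List.sorted (PySem.Chars.strip input_line.toList) (fun x => x) false).length : Int))
          (none, 0, 0, 0)).2.2.1,
        ((PySem.List.enumerate (PySem.List.sorted (PySem.Chars.strip input_line.toList) (fun x => x) false) 0).foldl
          (pvStepA ((PySem.List.sorted (PySem.Chars.strip input_line.toList) (fun x => x) false).length : Int))
          (none, 0, 0, 0)).2.2.2] from rfl]
  rw [pvFoldEnum_eq_runA]
  have h := pvMainAux (PySem.List.sorted (PySem.Chars.strip input_line.toList) (fun x => x) false).length
    (PySem.List.sorted (PySem.Chars.strip input_line.toList) (fun x => x) false)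
    le_rfl (by simpa using PySem.List.sorted_pairwise (PySem.Chars.strip input_line.toList) (fun x => x)) 0 0
  rw [h]
  simp [pvN_sorted]

-- ===== VERDICT (by name: the statement is the Claim_ definition above) =====
theorem two_three_count_spec : Claim_equal_two_three_count := by
  intro input_line _
  unfold Spec_two_three_count
  rw [pvA_eq, pvB_eq]
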